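-- pv_equiv track=rewrite | github.com/zlouity/adventofcode2020 | 11/day11b.py | check_gen
-- ===== SOURCE A (Python) =====
-- directions = [(0,1),(1,1),(1,0),(1,-1),(0,-1),(-1,-1),(-1,0),(-1,1)]
--
-- def check_gen(r,c,_p):
--     x = r
--     y = c
--     for d in directions:
--         x = r + d[0]
--         y = c + d[1]
--         while 0 <= x < len(_p) and 0 <= y < len(_p[0]):
--
--             if _p[x][y] == "#":
--                 return False
--             elif _p[x][y] == "L":
--                 break
--             x+=d[0]
--             y+=d[1]
--     return True
-- ===== SOURCE B (Python) =====
-- def _visible(r, c, x, y, _p, rows, cols):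
--     dx, dy = x - r, y - c
--     if dx == 0 and dy == 0:
--         return False
--     if dx != 0 and dy != 0 and abs(dx) != abs(dy):
--         return False
--     sx = (dx > 0) - (dx < 0)
--     sy = (dy > 0) - (dy < 0)
--     steps = max(abs(dx), abs(dy))
--     return all(
--         0 <= r + k * sx < rows and 0 <= c + k * sy < cols
--         and _p[r + k * sx][c + k * sy] not in ("#", "L")
--         for k in range(1, steps)
--     )
--
-- def check_gen(r, c, _p):
--     rows = len(_p)
--     cols = len(_p[0]) if _p else 0
--     return not any(
--         _p[x][y] == "#" and _visible(r, c, x, y, _p, rows, cols)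
--         for x in range(rows)
--         for y in range(cols)
--     )
-- ===== Notes on version B (the rewrite author's own statement) =====
-- stated objective: alternative
-- what changed: Instead of walking rays outward in 8 directions from (r,c), B scans every grid cell once and, for each occupied seat, decides visibility from (r,c) by a closed-form colinearity test (same row/column/diagonal) plus a check that the strictly-between cells are in-bounds floor.
-- outside the precondition, e.g. on check_gen(5, 0, [['.'], []]): A returns True, B raises IndexError; on check_gen(0, 0, [['#', '#'], ['L']]): A returns False, B returns False
import Mathlib
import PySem

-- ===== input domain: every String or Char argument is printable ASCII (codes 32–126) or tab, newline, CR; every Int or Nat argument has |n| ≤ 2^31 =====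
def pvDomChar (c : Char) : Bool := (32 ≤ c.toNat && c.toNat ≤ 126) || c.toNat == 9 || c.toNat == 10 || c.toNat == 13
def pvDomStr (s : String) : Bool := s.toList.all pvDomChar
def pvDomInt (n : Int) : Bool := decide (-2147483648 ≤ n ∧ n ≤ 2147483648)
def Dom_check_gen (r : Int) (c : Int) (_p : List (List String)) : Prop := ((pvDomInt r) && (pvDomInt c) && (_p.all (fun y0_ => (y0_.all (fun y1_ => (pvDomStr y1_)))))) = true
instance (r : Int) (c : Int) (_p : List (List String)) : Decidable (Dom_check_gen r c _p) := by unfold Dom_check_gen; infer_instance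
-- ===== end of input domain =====

-- B replaces A's outward 8-direction ray walk by a scan of every grid cell that tests, for
-- each occupied seat, visibility from (r,c) by a colinearity condition plus a clear-path
-- check of the strictly-between cells (objective: alternative algorithm, same result).

-- ===== PORT A =====
def pvDirs : List (Int × Int) := [(0,1),(1,1),(1,0),(1,-1),(0,-1),(-1,-1),(-1,0),(-1,1)]

-- fuel bound for A's while loop (each step moves x or y by ±1 towards leaving the
-- bounds 0 ≤ x < rows, 0 ≤ y < cols, so the loop exits within this many iterations)
def pvFuel (r : Int) (c : Int) (_p : List (List String)) : Nat :=
  _p.length + (_p.headD []).length + r.natAbs + c.natAbs + 2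

-- cell access _p[x][y]; on admitted inputs the indices used are always in range
def pvCell (_p : List (List String)) (x y : Int) : String :=
  ((PySem.List.pyGet? _p x).getD []) |> (fun row => PySem.List.pyGetD row y "")

-- `0 <= x < len(_p) and 0 <= y < len(_p[0])` (the second half is only reached with
-- 0 ≤ x < len(_p), so _p is nonempty there and headD [] is exact)
def pvInB (_p : List (List String)) (x y : Int) : Bool :=
  decide (0 ≤ x) && decide (x < (_p.length : Int)) &&
  decide (0 ≤ y) && decide (y < ((_p.headD []).length : Int))

-- A's inner while loop for one direction: true = the function returned False (saw "#")
def pvLoopA (_p : List (List String)) (dx dy : Int) : Nat → Int → Int → Bool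
  | 0, _, _ => false
  | f+1, x, y =>
    if pvInB _p x y then
      if pvCell _p x y == "#" then true
      else if pvCell _p x y == "L" then false
      else pvLoopA _p dx dy f (x + dx) (y + dy)
    else false

-- A's for loop over directions with the early `return False`
def pvGoA (r : Int) (c : Int) (_p : List (List String)) : List (Int × Int) → Bool
  | [] => true
  | d :: ds =>
    if pvLoopA _p d.1 d.2 (pvFuel r c _p) (r + d.1) (c + d.2) then false
    else pvGoA r c _p ds

def check_gen (r : Int) (c : Int) (_p : List (List String)) : Bool :=
  pvGoA r c _p pvDirs

-- ===== PORT B =====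
-- `(n > 0) - (n < 0)`
def pvSign (n : Int) : Int := (if 0 < n then 1 else 0) - (if n < 0 then 1 else 0)

-- _visible(r, c, x, y, _p, rows, cols): (x,y) is colinear with (r,c) and every strictly
-- intermediate cell is in bounds and floor (neither "#" nor "L")
def pvVisible (r : Int) (c : Int) (x : Int) (y : Int) (_p : List (List String))
    (rows : Int) (cols : Int) : Bool :=
  let dx := x - r
  let dy := y - c
  if dx == 0 && dy == 0 then false
  else if (!(dx == 0)) && (!(dy == 0)) && (!(|dx| == |dy|)) then false
  else
    let sx := pvSign dx
    let sy := pvSign dy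
    let steps := max |dx| |dy|
    (PySem.List.pyRange 1 steps 1).all (fun k =>
      decide (0 ≤ r + k * sx) && decide (r + k * sx < rows) &&
      decide (0 ≤ c + k * sy) && decide (c + k * sy < cols) &&
      !(pvCell _p (r + k * sx) (c + k * sy) == "#") &&
      !(pvCell _p (r + k * sx) (c + k * sy) == "L"))

def check_gen_alt (r : Int) (c : Int) (_p : List (List String)) : Bool :=
  let rows : Int := (_p.length : Int)
  let cols : Int := if _p.isEmpty then 0 else ((_p.headD []).length : Int)
  ! (PySem.List.pyRange 0 rows 1).any (fun x =>
      (PySem.List.pyRange 0 cols 1).any (fun y =>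
        (pvCell _p x y == "#") && pvVisible r c x y _p rows cols))

-- ===== PRECONDITION & SPEC =====
-- Pre_ excludes ragged grids with some row shorter than row 0, on which the Pythons can
-- index a short row and raise IndexError (on some such grids A still returns because its
-- walk never reaches the short row; see the cited excluded example).
def Pre_check_gen (r : Int) (c : Int) (_p : List (List String)) : Prop :=
  ∀ row ∈ _p, (_p.headD []).length ≤ row.length
instance (r : Int) (c : Int) (_p : List (List String)) : Decidable (Pre_check_gen r c _p) := by
  unfold Pre_check_gen; infer_instance

def pvWitness_check_gen : Int × Int × List (List String) :=
  (0, 0, [[".", "L"], ["#", "."]])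

def Spec_check_gen (r : Int) (c : Int) (_p : List (List String)) (out : Bool) : Prop := out = check_gen_alt r c _p
instance (r : Int) (c : Int) (_p : List (List String)) (out : Bool) : Decidable (Spec_check_gen r c _p out) := by unfold Spec_check_gen; infer_instance

-- ===== CLAIM (what is proved, stated in full; the proofs are below) =====
def Claim_equal_check_gen : Prop := ∀ (r : Int) (c : Int) (_p : List (List String)), Dom_check_gen r c _p → Pre_check_gen r c _p → Spec_check_gen r c _p (check_gen r c _p)

-- ===== LEMMAS AND PROOFS =====

-- proposition forms of the bounds test and of "floor cell"
def pvInBP (_p : List (List String)) (x y : Int) : Prop :=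
  0 ≤ x ∧ x < (_p.length : Int) ∧ 0 ≤ y ∧ y < ((_p.headD []).length : Int)

def pvFloor (_p : List (List String)) (x y : Int) : Prop :=
  pvCell _p x y ≠ "#" ∧ pvCell _p x y ≠ "L"

-- "A's walk in direction d sees '#' at step K from (r,c)"
def pvHit (r c : Int) (_p : List (List String)) (d : Int × Int) (K : Int) : Prop :=
  pvInBP _p (r + K * d.1) (c + K * d.2) ∧
  pvCell _p (r + K * d.1) (c + K * d.2) = "#" ∧
  ∀ j : Int, 1 ≤ j → j < K →
    pvInBP _p (r + j * d.1) (c + j * d.2) ∧ pvFloor _p (r + j * d.1) (c + j * d.2)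

theorem pvInB_iff (_p : List (List String)) (x y : Int) :
    pvInB _p x y = true ↔ pvInBP _p x y := by
  simp [pvInB, pvInBP, and_assoc]

-- characterization of A's inner loop, with the start generalized to step s of the ray
theorem loopA_iff (_p : List (List String)) (dx dy : Int) (f : Nat) (r c : Int) (s : Int) :
    pvLoopA _p dx dy f (r + s * dx) (c + s * dy) = true ↔
    ∃ K : Int, s ≤ K ∧ K < s + f ∧
      pvInBP _p (r + K * dx) (c + K * dy) ∧
      pvCell _p (r + K * dx) (c + K * dy) = "#" ∧
      ∀ j : Int, s ≤ j → j < K →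
        pvInBP _p (r + j * dx) (c + j * dy) ∧ pvFloor _p (r + j * dx) (c + j * dy) := by
  induction f generalizing s with
  | zero =>
    simp only [pvLoopA]
    constructor
    · intro h; exact absurd h (by simp)
    · rintro ⟨K, h1, h2, _⟩; omega
  | succ f ih =>
    simp only [pvLoopA]
    by_cases hb : pvInB _p (r + s * dx) (c + s * dy) = true
    · rw [if_pos hb]
      have hbp := (pvInB_iff _ _ _).mp hb
      by_cases h1 : pvCell _p (r + s * dx) (c + s * dy) = "#"
      · rw [if_pos (by simp [h1])]
        constructor
        · intro _
          exact ⟨s, le_refl s, by omega, hbp, h1, fun j hj1 hj2 => absurd hj2 (by omega)⟩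
        · intro _; rfl
      · rw [if_neg (by simp [h1])]
        by_cases h2 : pvCell _p (r + s * dx) (c + s * dy) = "L"
        · rw [if_pos (by simp [h2])]
          constructor
          · intro h; exact absurd h (by simp)
          · rintro ⟨K, hK1, hK2, hin, hcc, hall⟩
            exfalso
            rcases eq_or_lt_of_le hK1 with h | h
            · rw [← h] at hcc; exact h1 hcc
            · exact ((hall s le_rfl h).2.2) h2
        · rw [if_neg (by simp [h2])]
          have harr : ∀ z w : Int, z + s * w + w = z + (s + 1) * w := by intro z w; ring
          rw [harr r dx, harr c dy, ih (s + 1)]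
          constructor
          · rintro ⟨K, hK1, hK2, hin, hcc, hall⟩
            refine ⟨K, by omega, by push_cast at hK2 ⊢; omega, hin, hcc, fun j hj1 hj2 => ?_⟩
            rcases eq_or_lt_of_le hj1 with h | h
            · rw [← h]; exact ⟨hbp, h1, h2⟩
            · exact hall j (by omega) hj2
          · rintro ⟨K, hK1, hK2, hin, hcc, hall⟩
            have hKs : s < K := by
              rcases eq_or_lt_of_le hK1 with h | h
              · exfalso; rw [← h] at hcc; exact h1 hcc
              · exact h
            exact ⟨K, by omega, by push_cast at hK2 ⊢; omega, hin, hcc,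
              fun j hj1 hj2 => hall j (by omega) hj2⟩
    · rw [if_neg hb]
      constructor
      · intro h; exact absurd h (by simp)
      · rintro ⟨K, hK1, hK2, hin, hcc, hall⟩
        exfalso
        rcases eq_or_lt_of_le hK1 with h | h
        · rw [← h] at hin; exact hb ((pvInB_iff _ _ _).mpr hin)
        · exact hb ((pvInB_iff _ _ _).mpr (hall s le_rfl h).1)

-- A's direction loop: check_gen is False iff some direction's walk sees '#'
theorem goA_iff (r c : Int) (_p : List (List String)) (ds : List (Int × Int)) :
    pvGoA r c _p ds = false ↔
    ∃ d ∈ ds, pvLoopA _p d.1 d.2 (pvFuel r c _p) (r + d.1) (c + d.2) = true := by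
  induction ds with
  | nil => simp [pvGoA]
  | cons d ds ih =>
    simp only [pvGoA]
    by_cases h : pvLoopA _p d.1 d.2 (pvFuel r c _p) (r + d.1) (c + d.2) = true
    · simp [h]
    · simp [ih, Bool.of_not_eq_true h]

-- characterization of B's visibility test
theorem pvVisible_iff (r c x y : Int) (_p : List (List String)) (rows cols : Int) :
    pvVisible r c x y _p rows cols = true ↔
      ¬(x - r = 0 ∧ y - c = 0) ∧
      (x - r = 0 ∨ y - c = 0 ∨ |x - r| = |y - c|) ∧
      ∀ k : Int, 1 ≤ k → k < max |x - r| |y - c| →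
        (0 ≤ r + k * pvSign (x - r) ∧ r + k * pvSign (x - r) < rows ∧
         0 ≤ c + k * pvSign (y - c) ∧ c + k * pvSign (y - c) < cols ∧
         pvCell _p (r + k * pvSign (x - r)) (c + k * pvSign (y - c)) ≠ "#" ∧
         pvCell _p (r + k * pvSign (x - r)) (c + k * pvSign (y - c)) ≠ "L") := by
  simp only [pvVisible]
  split_ifs with g1 g2
  · simp only [Bool.and_eq_true, beq_iff_eq] at g1
    simp [g1]
  · have hg2 : (x - r ≠ 0 ∧ y - c ≠ 0) ∧ |x - r| ≠ |y - c| := by simpa using g2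
    constructor
    · intro h; exact absurd h (by simp)
    · rintro ⟨h1, h2, _⟩; exfalso; tauto
  · have hg1 : ¬(x - r = 0 ∧ y - c = 0) := by simpa using g1
    have hg2 : x - r = 0 ∨ y - c = 0 ∨ |x - r| = |y - c| := by
      have h : ¬((x - r ≠ 0 ∧ y - c ≠ 0) ∧ |x - r| ≠ |y - c|) := by simpa using g2
      by_cases hx : x - r = 0
      · exact Or.inl hx
      · by_cases hy : y - c = 0
        · exact Or.inr (Or.inl hy)
        · exact Or.inr (Or.inr (by_contra fun hne => h ⟨⟨hx, hy⟩, hne⟩))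
    rw [List.all_eq_true]
    constructor
    · intro h
      refine ⟨hg1, hg2, fun k hk1 hk2 => ?_⟩
      have hk := h k (by rw [PySem.List.mem_pyRange_one]; exact ⟨hk1, hk2⟩)
      simpa [and_assoc] using hk
    · rintro ⟨-, -, h⟩ k hk
      rw [PySem.List.mem_pyRange_one] at hk
      simpa [and_assoc] using h k hk.1 hk.2

-- B's cols expression equals the length of row 0 (both are 0 on the empty grid)
theorem colsB_eq (_p : List (List String)) :
    (if _p.isEmpty then (0 : Int) else ((_p.headD []).length : Int))
      = ((_p.headD []).length : Int) := by
  cases _p <;> simp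

-- B is False iff some in-bounds '#' cell is visible from (r,c)
theorem altB_iff (r c : Int) (_p : List (List String)) :
    check_gen_alt r c _p = false ↔
    ∃ x y : Int, 0 ≤ x ∧ x < (_p.length : Int) ∧ 0 ≤ y ∧ y < ((_p.headD []).length : Int) ∧
      pvCell _p x y = "#" ∧
      pvVisible r c x y _p (_p.length : Int) ((_p.headD []).length : Int) = true := by
  simp only [check_gen_alt]
  rw [colsB_eq]
  simp only [Bool.not_eq_false', List.any_eq_true, PySem.List.mem_pyRange_one,
    Bool.and_eq_true, beq_iff_eq]
  constructor
  · rintro ⟨x, ⟨hx0, hx1⟩, y, ⟨hy0, hy1⟩, hc, hv⟩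
    exact ⟨x, y, hx0, hx1, hy0, hy1, hc, hv⟩
  · rintro ⟨x, y, hx0, hx1, hy0, hy1, hc, hv⟩
    exact ⟨x, ⟨hx0, hx1⟩, y, ⟨hy0, hy1⟩, hc, hv⟩

theorem pvSign_cases (n : Int) : pvSign n = -1 ∧ n < 0 ∨ pvSign n = 0 ∧ n = 0 ∨ pvSign n = 1 ∧ 0 < n := by
  unfold pvSign; split_ifs <;> omega

theorem pvSign_of (K e : Int) (hK : 1 ≤ K) (he : e = -1 ∨ e = 0 ∨ e = 1) :
    pvSign (K * e) = e := by
  rcases he with rfl | rfl | rfl <;> unfold pvSign <;> split_ifs <;> omega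

theorem steps_of (K e1 e2 : Int) (hK : 1 ≤ K)
    (h1 : e1 = -1 ∨ e1 = 0 ∨ e1 = 1) (h2 : e2 = -1 ∨ e2 = 0 ∨ e2 = 1)
    (hne : ¬(e1 = 0 ∧ e2 = 0)) : max |K * e1| |K * e2| = K := by
  rcases h1 with rfl | rfl | rfl <;> rcases h2 with rfl | rfl | rfl <;>
    simp only [Int.abs_eq_natAbs] <;> omega

-- a hit along direction (e1,e2) at distance K makes (r+K*e1, c+K*e2) visible
theorem visible_of_dir (r c K : Int) (_p : List (List String)) (e1 e2 : Int) (hK : 1 ≤ K)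
    (h1 : e1 = -1 ∨ e1 = 0 ∨ e1 = 1) (h2 : e2 = -1 ∨ e2 = 0 ∨ e2 = 1)
    (hne : ¬(e1 = 0 ∧ e2 = 0))
    (hall : ∀ j : Int, 1 ≤ j → j < K →
      pvInBP _p (r + j * e1) (c + j * e2) ∧ pvFloor _p (r + j * e1) (c + j * e2)) :
    pvVisible r c (r + K * e1) (c + K * e2) _p (_p.length : Int) ((_p.headD []).length : Int) = true := by
  rw [pvVisible_iff]
  have hxr : r + K * e1 - r = K * e1 := by ring
  have hyc : c + K * e2 - c = K * e2 := by ring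
  rw [hxr, hyc, pvSign_of K e1 hK h1, pvSign_of K e2 hK h2, steps_of K e1 e2 hK h1 h2 hne]
  refine ⟨?_, ?_, ?_⟩
  · rintro ⟨ha, hb⟩
    apply hne
    constructor
    · rcases mul_eq_zero.mp ha with h | h
      · omega
      · exact h
    · rcases mul_eq_zero.mp hb with h | h
      · omega
      · exact h
  · rcases h1 with rfl | rfl | rfl <;> rcases h2 with rfl | rfl | rfl <;>
      first
      | (left; simp; done)
      | (right; left; simp; done)
      | (right; right; simp)
  · intro k hk1 hk2
    obtain ⟨⟨b1, b2, b3, b4⟩, f1, f2⟩ := hall k hk1 hk2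
    exact ⟨b1, b2, b3, b4, f1, f2⟩

-- bridge, A-side hit to B-side visible seat
theorem hit_to_seat (r c : Int) (_p : List (List String)) (d : Int × Int) (K : Int)
    (hd : d ∈ pvDirs) (hK : 1 ≤ K) (h : pvHit r c _p d K) :
    ∃ x y : Int, 0 ≤ x ∧ x < (_p.length : Int) ∧ 0 ≤ y ∧ y < ((_p.headD []).length : Int) ∧
      pvCell _p x y = "#" ∧
      pvVisible r c x y _p (_p.length : Int) ((_p.headD []).length : Int) = true := by
  have hfacts : (d.1 = -1 ∨ d.1 = 0 ∨ d.1 = 1) ∧ (d.2 = -1 ∨ d.2 = 0 ∨ d.2 = 1) ∧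
      ¬(d.1 = 0 ∧ d.2 = 0) := by
    simp only [pvDirs, List.mem_cons, List.not_mem_nil, or_false] at hd
    rcases hd with rfl | rfl | rfl | rfl | rfl | rfl | rfl | rfl <;>
      exact ⟨by decide, by decide, by decide⟩
  obtain ⟨⟨hin1, hin2, hin3, hin4⟩, hcc, hall⟩ := h
  exact ⟨r + K * d.1, c + K * d.2, hin1, hin2, hin3, hin4, hcc,
    visible_of_dir r c K _p d.1 d.2 hK hfacts.1 hfacts.2.1 hfacts.2.2 hall⟩

theorem max_abs_mul_sign_left (dx dy : Int) (hcol : dx = 0 ∨ dy = 0 ∨ |dx| = |dy|) :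
    max |dx| |dy| * pvSign dx = dx := by
  rcases pvSign_cases dx with ⟨hs, h⟩ | ⟨hs, h⟩ | ⟨hs, h⟩ <;> rw [hs] <;>
    rcases hcol with h' | h' | h' <;> simp only [Int.abs_eq_natAbs] at * <;> omega

theorem max_abs_mul_sign_right (dx dy : Int) (hcol : dx = 0 ∨ dy = 0 ∨ |dx| = |dy|) :
    max |dx| |dy| * pvSign dy = dy := by
  rcases pvSign_cases dy with ⟨hs, h⟩ | ⟨hs, h⟩ | ⟨hs, h⟩ <;> rw [hs] <;>
    rcases hcol with h' | h' | h' <;> simp only [Int.abs_eq_natAbs] at * <;> omega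

-- bridge, B-side visible seat to A-side hit
theorem seat_to_hit (r c : Int) (_p : List (List String)) (x y : Int)
    (hx0 : 0 ≤ x) (hx1 : x < (_p.length : Int)) (hy0 : 0 ≤ y) (hy1 : y < ((_p.headD []).length : Int))
    (hc : pvCell _p x y = "#")
    (hv : pvVisible r c x y _p (_p.length : Int) ((_p.headD []).length : Int) = true) :
    ∃ d ∈ pvDirs, ∃ K : Int, 1 ≤ K ∧ K < 1 + (pvFuel r c _p : Int) ∧ pvHit r c _p d K := by
  rw [pvVisible_iff] at hv
  obtain ⟨hne, hcol, hall⟩ := hv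
  have hmem : (pvSign (x - r), pvSign (y - c)) ∈ pvDirs := by
    rcases pvSign_cases (x - r) with ⟨hs, h⟩ | ⟨hs, h⟩ | ⟨hs, h⟩ <;>
      rcases pvSign_cases (y - c) with ⟨hs', h'⟩ | ⟨hs', h'⟩ | ⟨hs', h'⟩ <;>
      rw [hs, hs'] <;> first
      | decide
      | exact absurd ⟨h, h'⟩ hne
  have hKx : max |x - r| |y - c| * pvSign (x - r) = x - r := max_abs_mul_sign_left _ _ hcol
  have hKy : max |x - r| |y - c| * pvSign (y - c) = y - c := max_abs_mul_sign_right _ _ hcol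
  have hK1 : 1 ≤ max |x - r| |y - c| := by
    simp only [Int.abs_eq_natAbs] at *
    omega
  have hKf : max |x - r| |y - c| < 1 + (pvFuel r c _p : Int) := by
    unfold pvFuel
    push_cast
    simp only [Int.abs_eq_natAbs] at *
    omega
  refine ⟨(pvSign (x - r), pvSign (y - c)), hmem, max |x - r| |y - c|, hK1, hKf, ?_, ?_, ?_⟩
  · show pvInBP _p (r + max |x - r| |y - c| * pvSign (x - r)) (c + max |x - r| |y - c| * pvSign (y - c))
    rw [hKx, hKy]
    exact ⟨by omega, by omega, by omega, by omega⟩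
  · show pvCell _p (r + max |x - r| |y - c| * pvSign (x - r)) (c + max |x - r| |y - c| * pvSign (y - c)) = "#"
    rw [hKx, hKy]
    simpa using hc
  · intro j hj1 hj2
    obtain ⟨b1, b2, b3, b4, f1, f2⟩ := hall j hj1 hj2
    exact ⟨⟨b1, b2, b3, b4⟩, f1, f2⟩

-- ===== VERDICT (by name: the statement is the Claim_ definition above) =====
theorem check_gen_spec : Claim_equal_check_gen := by
  intro r c _p _ _
  unfold Spec_check_gen
  have key : check_gen r c _p = false ↔ check_gen_alt r c _p = false := by
    rw [show check_gen r c _p = pvGoA r c _p pvDirs from rfl, goA_iff, altB_iff]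
    constructor
    · rintro ⟨d, hd, hl⟩
      rw [show r + d.1 = r + 1 * d.1 by ring, show c + d.2 = c + 1 * d.2 by ring,
        loopA_iff] at hl
      obtain ⟨K, hK1, hK2, hin, hcc, hall⟩ := hl
      exact hit_to_seat r c _p d K hd hK1 ⟨hin, hcc, hall⟩
    · rintro ⟨x, y, hx0, hx1, hy0, hy1, hcc, hv⟩
      obtain ⟨d, hd, K, hK1, hK2, hin, hc2, hall⟩ := seat_to_hit r c _p x y hx0 hx1 hy0 hy1 hcc hv
      refine ⟨d, hd, ?_⟩
      rw [show r + d.1 = r + 1 * d.1 by ring, show c + d.2 = c + 1 * d.2 by ring, loopA_iff]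
      exact ⟨K, hK1, by omega, hin, hc2, hall⟩
  cases ha : check_gen r c _p <;> cases hb : check_gen_alt r c _p <;> simp_all
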